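-- pv_equiv track=rewrite | github.com/RONIN-047/Smart-Expense-Tracker | views/browse.py | _group_expenses_by_date
-- ===== SOURCE A (Python) =====
-- def _group_expenses_by_date(expenses):
--     """Group expenses by date"""
--     groups = {}
--     for exp in expenses:
--         date = exp['date']
--         if date not in groups:
--             groups[date] = []
--         groups[date].append(exp)
--     return groups
-- ===== SOURCE B (Python) =====
-- def _group_expenses_by_date(expenses):
--     """Group expenses by date"""
--     dates = dict.fromkeys(exp['date'] for exp in expenses)
--     return {d: [exp for exp in expenses if exp['date'] == d] for d in dates}
-- ===== Notes on version B (the rewrite author's own statement) =====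
-- stated objective: alternative
-- what changed: Replaces A's single-pass dict build with membership checks and in-place appends by a two-phase strategy: collect the distinct dates in first-occurrence order with dict.fromkeys, then build each group in one comprehension by filtering the whole list per date.
import Mathlib
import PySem

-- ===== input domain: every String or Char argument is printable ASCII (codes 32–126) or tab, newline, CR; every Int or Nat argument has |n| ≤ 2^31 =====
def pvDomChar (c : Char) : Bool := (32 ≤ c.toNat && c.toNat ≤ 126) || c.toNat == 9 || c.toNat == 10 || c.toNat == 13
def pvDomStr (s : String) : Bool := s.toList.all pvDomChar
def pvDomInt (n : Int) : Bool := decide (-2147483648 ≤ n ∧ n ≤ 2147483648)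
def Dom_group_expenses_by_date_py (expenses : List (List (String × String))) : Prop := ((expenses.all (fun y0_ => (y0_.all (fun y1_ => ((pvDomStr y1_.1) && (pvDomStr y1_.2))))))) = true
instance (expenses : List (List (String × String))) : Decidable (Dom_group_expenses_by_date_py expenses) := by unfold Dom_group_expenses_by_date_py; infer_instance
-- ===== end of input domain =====

-- B replaces A's single-pass dict build (membership check + append) by collecting the distinct
-- dates first and then building each group by filtering the whole list per date (objective: alternative).


-- ===== PORT A =====
-- exp['date'] : first-match lookup in the expense dict (none = Python KeyError, excluded by Pre_)
def pvDateOf (exp : List (String × String)) : Option String := (PySem.Dict.mk exp).get? "date"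

def group_expenses_by_date_py (expenses : List (List (String × String))) : List (String × List (List (String × String))) :=
  (expenses.foldl (fun groups exp =>
      match pvDateOf exp with
      | none => groups   -- Python raises KeyError here; such inputs are outside Pre_
      | some date =>
        let g1 := if groups.contains date then groups
                  else groups.insert date ([] : List (List (String × String)))
        g1.insert date (g1.getD date [] ++ [exp]))
    PySem.Dict.empty).items

-- ===== PORT B =====
def group_expenses_by_date_py_alt (expenses : List (List (String × String))) : List (String × List (List (String × String))) :=
  let dates := PySem.List.dedup (expenses.filterMap pvDateOf)
  dates.map (fun d => (d, expenses.filter (fun exp => pvDateOf exp == some d)))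

-- ===== PRECONDITION & SPEC =====
-- Pre_ excludes exactly the inputs where some expense has no 'date' key: there Python A raises KeyError
-- (and Python B raises KeyError too).
def Pre_group_expenses_by_date_py (expenses : List (List (String × String))) : Prop :=
  ∀ exp ∈ expenses, (pvDateOf exp).isSome = true
instance (expenses : List (List (String × String))) : Decidable (Pre_group_expenses_by_date_py expenses) := by unfold Pre_group_expenses_by_date_py; infer_instance
def pvWitness_group_expenses_by_date_py : (List (List (String × String))) :=
  [[("date", "2024-01-01"), ("amount", "5")], [("date", "2024-01-02")], [("date", "2024-01-01"), ("amount", "7")]]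

def Spec_group_expenses_by_date_py (expenses : List (List (String × String))) (out : List (String × List (List (String × String)))) : Prop := out = group_expenses_by_date_py_alt expenses
instance (expenses : List (List (String × String))) (out : List (String × List (List (String × String)))) : Decidable (Spec_group_expenses_by_date_py expenses out) := by unfold Spec_group_expenses_by_date_py; infer_instance

-- ===== CLAIM (what is proved, stated in full; the proofs are below) =====
def Claim_equal_group_expenses_by_date_py : Prop := ∀ (expenses : List (List (String × String))), Dom_group_expenses_by_date_py expenses → Pre_group_expenses_by_date_py expenses → Spec_group_expenses_by_date_py expenses (group_expenses_by_date_py expenses)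

-- ===== LEMMAS AND PROOFS =====

-- B's body, as a function of the prefix processed so far (the loop invariant's right-hand side)
def pvBodyB (l : List (List (String × String))) : List (String × List (List (String × String))) :=
  (PySem.List.dedup (l.filterMap pvDateOf)).map
    (fun d => (d, l.filter (fun exp => pvDateOf exp == some d)))

lemma pvMain (l : List (List (String × String))) :
    l.foldl (fun groups exp =>
      match pvDateOf exp with
      | none => groups
      | some date =>
        let g1 := if groups.contains date then groups
                  else groups.insert date ([] : List (List (String × String)))
        g1.insert date (g1.getD date [] ++ [exp]))
    PySem.Dict.empty = PySem.Dict.mk (pvBodyB l) := by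
  induction l using List.reverseRecOn with
  | nil => rfl
  | append_singleton l e ih =>
    rw [List.foldl_append, ih, List.foldl_cons, List.foldl_nil]
    cases h : pvDateOf e with
    | none =>
      have hfm : (l ++ [e]).filterMap pvDateOf = l.filterMap pvDateOf := by
        simp [List.filterMap_append, h]
      have hfl : ∀ d : String, (l ++ [e]).filter (fun exp => pvDateOf exp == some d)
          = l.filter (fun exp => pvDateOf exp == some d) := by
        intro d; simp [List.filter_append, h]
      simp only [pvBodyB, hfm, hfl]

    | some d =>
      have hkeys : (PySem.Dict.mk (pvBodyB l)).keys = PySem.List.dedup (l.filterMap pvDateOf) := by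
        simp [pvBodyB, PySem.Dict.keys_mk, List.map_map, Function.comp_def]
      have hnodup : (PySem.Dict.mk (pvBodyB l)).keys.Nodup := by
        rw [hkeys]; simp [PySem.List.dedup_eq_ofList, PySem.Set.nodup_ofList]
      have hfm : (l ++ [e]).filterMap pvDateOf = l.filterMap pvDateOf ++ [d] := by
        simp [List.filterMap_append, h]
      by_cases hd : d ∈ l.filterMap pvDateOf
      · -- existing date: the entry for d gets e appended in place
        have hcont : (PySem.Dict.mk (pvBodyB l)).contains d = true := by
          rw [PySem.Dict.contains_eq_decide_mem_keys, hkeys]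
          simp [hd]
        have hmem : (d, l.filter (fun exp => pvDateOf exp == some d)) ∈ (PySem.Dict.mk (pvBodyB l)).items := by
          show _ ∈ pvBodyB l
          exact List.mem_map.mpr ⟨d, by simp [hd], rfl⟩
        have hgetD : (PySem.Dict.mk (pvBodyB l)).getD d [] = l.filter (fun exp => pvDateOf exp == some d) :=
          PySem.Dict.getD_of_mem_items _ hmem hnodup []
        simp only [hcont, if_pos]
        apply PySem.Dict.ext
        rw [PySem.Dict.items_insert_of_contains _ _ hcont, hgetD]
        show (pvBodyB l).map _ = pvBodyB (l ++ [e])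
        have hded : PySem.List.dedup (l.filterMap pvDateOf ++ [d]) = PySem.List.dedup (l.filterMap pvDateOf) := by
          simp [PySem.List.dedup_eq_ofList, PySem.Set.ofList_append_singleton,
                PySem.Set.add_of_mem ((PySem.Set.mem_ofList _ _).mpr hd)]
        simp only [pvBodyB, hfm, hded, List.map_map]
        apply List.map_congr_left
        intro d' _
        by_cases hdd : d' = d
        · subst hdd
          simp [List.filter_append, h]
        · simp [List.filter_append, h, hdd, Ne.symm hdd]
      · -- new date: a fresh entry (d, [e]) is appended at the end
        have hcont : (PySem.Dict.mk (pvBodyB l)).contains d = false := by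
          rw [PySem.Dict.contains_eq_decide_mem_keys, hkeys]
          simp [hd]
        have hfilnil : l.filter (fun exp => pvDateOf exp == some d) = [] := by
          rw [List.filter_eq_nil_iff]
          intro x hx hk
          exact hd (List.mem_filterMap.mpr ⟨x, hx, by simpa using hk⟩)
        simp only [hcont, Bool.false_eq_true, if_false]
        apply PySem.Dict.ext
        rw [PySem.Dict.getD_insert_self]
        have hcont2 : ((PySem.Dict.mk (pvBodyB l)).insert d ([] : List (List (String × String)))).contains d = true :=
          PySem.Dict.contains_insert_self _ _ _
        rw [PySem.Dict.items_insert_of_contains _ _ hcont2,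
            PySem.Dict.items_insert_of_not_contains _ _ hcont]
        show ((pvBodyB l) ++ [(d, [])]).map _ = pvBodyB (l ++ [e])
        have hded : PySem.List.dedup (l.filterMap pvDateOf ++ [d])
            = PySem.List.dedup (l.filterMap pvDateOf) ++ [d] := by
          simp [PySem.List.dedup_eq_ofList, PySem.Set.ofList_append_singleton,
                PySem.Set.add_of_not_mem (fun hm => hd ((PySem.Set.mem_ofList _ _).mp hm))]
        simp only [pvBodyB, hfm, hded, List.map_append, List.map_cons, List.map_nil, List.map_map]
        congr 1
        · apply List.map_congr_left
          intro d' hd'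
          have hdd : d' ≠ d := fun hddd => hd (by
            rw [hddd] at hd'
            exact (PySem.List.mem_dedup _ _).mp hd')
          simp [List.filter_append, h, hdd, Ne.symm hdd]
        · simp [List.filter_append, h, hfilnil]

-- ===== VERDICT (by name: the statement is the Claim_ definition above) =====
theorem group_expenses_by_date_py_spec : Claim_equal_group_expenses_by_date_py := by
  intro expenses _ _
  unfold Spec_group_expenses_by_date_py group_expenses_by_date_py group_expenses_by_date_py_alt
  rw [pvMain]
  rfl
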